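-- pv_equiv track=rewrite | github.com/jaehyun-dev/Today-I-Learned | Algorithm/Quiz.py | min_fee
-- ===== SOURCE A (Python) =====
-- def min_fee(pages_to_print):
--     # 코드를 작성하세요.
--     time_sum = 0
--     i = 0
--     j = 0
--     while i < len(pages_to_print):
--         while j < len(pages_to_print):
--             time_sum += sorted(pages_to_print)[i] * (len(pages_to_print)-j)
--             i += 1
--             j += 1
--     return time_sum
-- ===== SOURCE B (Python) =====
-- def min_fee(pages_to_print):
--     total = 0
--     running = 0
--     for p in sorted(pages_to_print):
--         running += p
--         total += running
--     return total
-- ===== Notes on version B (the rewrite author's own statement) =====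
-- stated objective: faster
-- what changed: B sorts once and sums running prefix totals in a single pass, instead of A's nested while loops that re-sort the whole list on every iteration and multiply each element by an explicit remaining-count weight.
import Mathlib
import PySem

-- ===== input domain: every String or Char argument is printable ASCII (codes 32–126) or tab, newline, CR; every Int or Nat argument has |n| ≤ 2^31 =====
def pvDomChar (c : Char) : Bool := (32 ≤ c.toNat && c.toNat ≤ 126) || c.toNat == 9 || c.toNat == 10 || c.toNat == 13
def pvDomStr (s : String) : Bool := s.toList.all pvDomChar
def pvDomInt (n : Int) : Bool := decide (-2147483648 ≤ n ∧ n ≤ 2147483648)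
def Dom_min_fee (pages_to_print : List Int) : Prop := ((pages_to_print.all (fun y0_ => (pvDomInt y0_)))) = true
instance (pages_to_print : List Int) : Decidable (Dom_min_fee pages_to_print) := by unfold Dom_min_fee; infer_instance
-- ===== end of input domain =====

-- B sorts once and keeps a running prefix-sum accumulator (one pass); A re-sorts the list inside the inner loop and weights each element by the remaining count.

-- ===== PORT A =====
-- inner while loop: while j < len(pages): time_sum += sorted(pages)[i]*(len(pages)-j); i += 1; j += 1
-- (sorted(pages)[i] never goes out of range on reachable states, since i = j there; .getD 0 is the in-range access)
def min_fee_inner (xs : List Int) (i j : Nat) (s : Int) : Nat × Nat × Int :=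
  if j < xs.length then
    min_fee_inner xs (i + 1) (j + 1)
      (s + (PySem.List.sorted xs (fun x => x) false).getD i 0 * ((xs.length : Int) - (j : Int)))
  else (i, j, s)
termination_by xs.length - j

-- outer while loop: while i < len(pages): <inner>.  Fuel only makes the loop total in Lean;
-- fuel = len+1 is never exhausted from the initial state (each inner pass drives j, and with it i, to len).
def min_fee_outer (xs : List Int) : Nat → Nat → Nat → Int → Int
  | 0, _, _, s => s
  | f + 1, i, j, s =>
    if i < xs.length then
      let r := min_fee_inner xs i j s
      min_fee_outer xs f r.1 r.2.1 r.2.2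
    else s

def min_fee (pages_to_print : List Int) : Int :=
  min_fee_outer pages_to_print (pages_to_print.length + 1) 0 0 0

-- ===== PORT B =====
def min_fee_alt (pages_to_print : List Int) : Int :=
  ((PySem.List.sorted pages_to_print (fun x => x) false).foldl
    (fun (acc : Int × Int) p => (acc.1 + p, acc.2 + (acc.1 + p))) (0, 0)).2

-- ===== PRECONDITION & SPEC =====
def Spec_min_fee (pages_to_print : List Int) (out : Int) : Prop := out = min_fee_alt pages_to_print
instance (pages_to_print : List Int) (out : Int) : Decidable (Spec_min_fee pages_to_print out) := by unfold Spec_min_fee; infer_instance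

-- ===== CLAIM (what is proved, stated in full; the proofs are below) =====
def Claim_equal_min_fee : Prop := ∀ (pages_to_print : List Int), Dom_min_fee pages_to_print → Spec_min_fee pages_to_print (min_fee pages_to_print)

-- ===== LEMMAS AND PROOFS =====

-- weighted sum: wsum [a0,…,a(m-1)] w = Σ a_k * (w - k)
def wsum : List Int → Nat → Int
  | [], _ => 0
  | a :: l, w => a * (w : Int) + wsum l (w - 1)

theorem min_fee_inner_spec (xs : List Int) :
    ∀ (i : Nat) (s : Int), i ≤ xs.length →
      min_fee_inner xs i i s =
        (xs.length, xs.length, s + wsum ((PySem.List.sorted xs (fun x => x) false).drop i) (xs.length - i)) := by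
  intro i
  induction hm : xs.length - i using Nat.strong_induction_on generalizing i with
  | _ m ih =>
    intro s hi
    subst hm
    rw [min_fee_inner]
    by_cases h : i < xs.length
    · simp only [if_pos h]
      have hlen : (PySem.List.sorted xs (fun x => x) false).length = xs.length :=
        PySem.List.length_sorted ..
      have hi' : i < (PySem.List.sorted xs (fun x => x) false).length := hlen ▸ h
      have hdrop : (PySem.List.sorted xs (fun x => x) false).drop i =
          (PySem.List.sorted xs (fun x => x) false)[i] ::
            (PySem.List.sorted xs (fun x => x) false).drop (i + 1) :=
        List.drop_eq_getElem_cons hi'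
      have := ih (xs.length - (i + 1)) (by omega) (i + 1) rfl
        (s + (PySem.List.sorted xs (fun x => x) false).getD i 0 * ((xs.length : Int) - (i : Int)))
        (by omega)
      rw [this]
      rw [hdrop]
      simp only [wsum, List.getD_eq_getElem?_getD, List.getElem?_eq_getElem hi', Option.getD_some]
      have hw : ((xs.length - i : Nat) : Int) = (xs.length : Int) - (i : Int) := by omega
      have hw2 : xs.length - i - 1 = xs.length - (i + 1) := by omega
      rw [hw2, hw]
      refine Prod.ext rfl (Prod.ext rfl ?_)
      simp only
      ring
    · simp only [if_neg h]
      have hie : i = xs.length := by omega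
      subst hie
      have hlen : (PySem.List.sorted xs (fun x => x) false).length = xs.length :=
        PySem.List.length_sorted ..
      rw [← hlen, List.drop_length]
      simp [wsum]

theorem foldl_prefix (l : List Int) :
    ∀ (r t : Int),
      (l.foldl (fun (acc : Int × Int) p => (acc.1 + p, acc.2 + (acc.1 + p))) (r, t)).2 =
        t + (l.length : Int) * r + wsum l l.length := by
  induction l with
  | nil => intro r t; simp [wsum]
  | cons a l ih =>
    intro r t
    simp only [List.foldl_cons, List.length_cons, wsum]
    rw [ih]
    push_cast
    ring

theorem min_fee_eq_wsum (xs : List Int) :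
    min_fee xs = wsum (PySem.List.sorted xs (fun x => x) false) xs.length := by
  unfold min_fee
  by_cases h : 0 < xs.length
  · obtain ⟨n, hn⟩ : ∃ n, xs.length = n + 1 := ⟨xs.length - 1, by omega⟩
    rw [hn]
    show min_fee_outer xs (n + 1 + 1) 0 0 0 = _
    rw [min_fee_outer]
    have hni : xs.length = n + 1 := hn
    simp only [hn, if_pos (Nat.succ_pos n)]
    have hspec := min_fee_inner_spec xs 0 0 (Nat.zero_le _)
    rw [hn] at hspec
    rw [hspec]
    simp only [List.drop_zero, Nat.sub_zero, zero_add]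
    rw [min_fee_outer]
    simp [hn]
  · have hx : xs = [] := List.eq_nil_of_length_eq_zero (by omega)
    subst hx
    simp [min_fee_outer, wsum, PySem.List.sorted]

-- ===== VERDICT (by name: the statement is the Claim_ definition above) =====
theorem min_fee_spec : Claim_equal_min_fee := by
  intro xs _
  unfold Spec_min_fee min_fee_alt
  rw [min_fee_eq_wsum, foldl_prefix]
  have hlen : (PySem.List.sorted xs (fun x => x) false).length = xs.length :=
    PySem.List.length_sorted ..
  rw [hlen]
  ring
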